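-- pv_equiv track=rewrite | github.com/1233213f/Python-Encryption | 栅栏加密1.py | buwei
-- ===== SOURCE A (Python) =====
-- import math
--
-- def buwei(encrypted_str,fence_length):    # 比如 14，4
--     str_len = len(encrypted_str)
--     fence_count = math.ceil(str_len/ fence_length)   # 得出4
--     target_length = fence_count*fence_length
--     jiequ = []
--     while str_len<target_length:
--         encrypted_str = encrypted_str + '*'
--         jiequ.append(encrypted_str[-fence_count :])
--         encrypted_str = encrypted_str[:-fence_count]
--         str_len += 1
--
--     jiequ.reverse()
--     s = ''
--     for i in jiequ:
--         s = s + i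
--
--     result = encrypted_str + s
--     return result
-- ===== SOURCE B (Python) =====
-- def buwei(encrypted_str, fence_length):
--     n = len(encrypted_str)
--     c = -(-n // fence_length)          # ceil(n / fence_length), integer arithmetic
--     pad = c * fence_length - n         # number of '*' to insert
--     if pad <= 0:
--         return encrypted_str
--     w = c - 1
--     keep = n - pad * w
--     chunks = [encrypted_str[keep + i * w: keep + (i + 1) * w] + '*' for i in range(pad)]
--     return encrypted_str[:keep] + ''.join(chunks)
-- ===== Notes on version B (the rewrite author's own statement) =====
-- stated objective: faster
-- what changed: Replaces the quadratic while-loop (which repeatedly appends '*', slices off and re-concatenates the string's tail) by a closed-form computation of the pad count and chunk boundaries, building the result in one pass with join.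
import Mathlib
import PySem

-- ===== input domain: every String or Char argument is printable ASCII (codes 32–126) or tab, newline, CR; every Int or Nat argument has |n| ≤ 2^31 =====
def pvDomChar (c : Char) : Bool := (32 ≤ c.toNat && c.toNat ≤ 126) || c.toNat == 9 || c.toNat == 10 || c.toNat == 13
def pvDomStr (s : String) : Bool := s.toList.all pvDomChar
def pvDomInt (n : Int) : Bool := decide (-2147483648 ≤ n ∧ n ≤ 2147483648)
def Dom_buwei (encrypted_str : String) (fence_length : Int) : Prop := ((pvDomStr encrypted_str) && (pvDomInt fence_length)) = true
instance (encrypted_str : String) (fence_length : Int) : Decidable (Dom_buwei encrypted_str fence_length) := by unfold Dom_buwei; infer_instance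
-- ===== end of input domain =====

-- B replaces A's quadratic append/slice while-loop by a closed-form computation of the
-- pad count and chunk boundaries, built in one pass (asymptotically faster).

-- ===== PORT A =====
-- the 'while str_len < target_length' loop; fuel = (target_length - str_len).toNat, exact iteration count
def buweiLoop (fenceCount targetLength : Int) :
    Nat → List Char → List (List Char) → Int → List Char × List (List Char)
  | 0, s, jiequ, _ => (s, jiequ)
  | fuel+1, s, jiequ, strLen =>
    if strLen < targetLength then
      let s1 := s ++ ['*']                                         -- encrypted_str = encrypted_str + '*'
      let chunk := PySem.List.slice s1 (some (-fenceCount)) none   -- encrypted_str[-fence_count:]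
      let s2 := PySem.List.slice s1 none (some (-fenceCount))      -- encrypted_str[:-fence_count]
      buweiLoop fenceCount targetLength fuel s2 (jiequ ++ [chunk]) (strLen + 1)
    else (s, jiequ)

def buwei (encrypted_str : String) (fence_length : Int) : String :=
  let cs := encrypted_str.toList
  let strLen : Int := cs.length
  -- math.ceil(str_len / fence_length): exact as integer ceiling on Dom (|values| far below 2^53)
  let fenceCount : Int := -(PySem.Int.floordiv (-strLen) fence_length)
  let targetLength := fenceCount * fence_length
  let r := buweiLoop fenceCount targetLength (targetLength - strLen).toNat cs [] strLen
  let jiequ := r.2.reverse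
  let s := jiequ.foldl (fun acc i => acc ++ i) ([] : List Char)
  String.ofList (r.1 ++ s)

-- ===== PORT B =====
def buwei_alt (encrypted_str : String) (fence_length : Int) : String :=
  let cs := encrypted_str.toList
  let n : Int := cs.length
  let c : Int := -(PySem.Int.floordiv (-n) fence_length)   -- -(-n // fence_length)
  let pad := c * fence_length - n
  if pad ≤ 0 then encrypted_str
  else
    let w := c - 1
    let keep := n - pad * w
    let chunks := (PySem.List.pyRange 0 pad 1).map
      (fun i => PySem.List.slice cs (some (keep + i * w)) (some (keep + (i + 1) * w)) ++ ['*'])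
    String.ofList (PySem.List.slice cs none (some keep) ++ chunks.flatten)

-- ===== PRECONDITION & SPEC =====
-- fence_length = 0 makes A raise ZeroDivisionError; excluded.
def Pre_buwei (encrypted_str : String) (fence_length : Int) : Prop := fence_length ≠ 0
instance (encrypted_str : String) (fence_length : Int) : Decidable (Pre_buwei encrypted_str fence_length) := by unfold Pre_buwei; infer_instance
def pvWitness_buwei : String × Int := ("abcde", 4)

def Spec_buwei (encrypted_str : String) (fence_length : Int) (out : String) : Prop := out = buwei_alt encrypted_str fence_length
instance (encrypted_str : String) (fence_length : Int) (out : String) : Decidable (Spec_buwei encrypted_str fence_length out) := by unfold Spec_buwei; infer_instance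

-- ===== CLAIM (what is proved, stated in full; the proofs are below) =====
def Claim_equal_buwei : Prop := ∀ (encrypted_str : String) (fence_length : Int), Dom_buwei encrypted_str fence_length → Pre_buwei encrypted_str fence_length → Spec_buwei encrypted_str fence_length (buwei encrypted_str fence_length)

-- ===== LEMMAS AND PROOFS =====

-- reversing a range-comprehension = the back-to-front comprehension
lemma reverse_map_range (g : Nat → List Char) (k : Nat) :
    ((List.range k).map g).reverse = (List.range k).map (fun j => g (k - 1 - j)) := by
  rw [← List.map_reverse, List.range_eq_range', List.reverse_range']
  rw [← List.range_eq_range']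
  simp [Function.comp]

-- the A-loop, run k times on a star-free tail state
lemma buweiLoop_spec (c tgt : Int) (w : Nat) (hw : w = (c - 1).toNat) (hc : 1 ≤ c) :
    ∀ (k : Nat) (s : List Char) (j : List (List Char)) (m : Int),
      m + k = tgt → k * w ≤ s.length →
      buweiLoop c tgt k s j m =
        (s.take (s.length - k * w),
         j ++ (List.range k).map (fun i => (s.drop (s.length - (i + 1) * w)).take w ++ ['*'])) := by
  intro k
  induction k with
  | zero => intro s j m _ _; simp [buweiLoop]
  | succ k ih =>
    intro s j m hm hlen
    have hmt : m < tgt := by omega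
    have hcn : c = ((w + 1 : Nat) : Int) := by omega
    set L := s.length with hL
    have hwL : w ≤ L := by
      have := Nat.le_of_eq (rfl : (k+1)*w = (k+1)*w)
      calc w = 1 * w := (one_mul w).symm
        _ ≤ (k+1) * w := Nat.mul_le_mul_right w (by omega)
        _ ≤ L := hlen
    have hkwL : k * w ≤ L - w := by
      have h1 : (k+1) * w = k*w + w := by ring
      omega
    -- one unfolding step
    rw [buweiLoop, if_pos hmt]
    have hs1len : (s ++ ['*']).length = L + 1 := by simp [hL]
    have hchunk : PySem.List.slice (s ++ ['*']) (some (-c)) none = s.drop (L - w) ++ ['*'] := by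
      rw [hcn, PySem.List.slice_from_neg_natCast _ _ (by omega)]
      rw [hs1len]
      have : L + 1 - (w + 1) = L - w := by omega
      rw [this, List.drop_append_of_le_length (by omega)]
    have hs2 : PySem.List.slice (s ++ ['*']) none (some (-c)) = s.take (L - w) := by
      rw [hcn, PySem.List.slice_to_neg_natCast _ _ (by omega)]
      rw [hs1len]
      have : L + 1 - (w + 1) = L - w := by omega
      rw [this, List.take_append_of_le_length (by omega)]
    simp only [hchunk, hs2]
    have hlt : (s.take (L - w)).length = L - w := by
      simp [List.length_take]; omega
    rw [ih (s.take (L - w)) (j ++ [s.drop (L - w) ++ ['*']]) (m + 1) (by omega)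
        (by rw [hlt]; exact hkwL)]
    rw [Prod.mk.injEq]
    refine ⟨?_, ?_⟩
    · -- first components
      rw [hlt, List.take_take]
      congr 1
      have h1 : (k+1) * w = k*w + w := by ring
      omega
    · -- second components
      rw [List.append_assoc]
      congr 1
      rw [List.range_succ_eq_map]
      simp only [List.map_cons, List.map_map]
      have hdl : (s.drop (L - w)).length = w := by simp [hL]; omega
      rw [Nat.one_mul, List.take_of_length_le (le_of_eq hdl), List.singleton_append]
      congr 1
      apply List.map_congr_left
      intro i hi
      have hik : i < k := List.mem_range.mp hi
      simp only [Function.comp]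
      have hi2 : (i + 2) * w ≤ L := by
        calc (i + 2) * w ≤ (k + 1) * w := Nat.mul_le_mul_right w (by omega)
          _ ≤ L := hlen
      have h1 : (i+2)*w = (i+1)*w + w := by ring
      have e1 : (s.take (L - w)).drop ((s.take (L-w)).length - (i + 1) * w)
          = (s.drop (L - (i + 2) * w)).take ((i+1) * w) := by
        rw [hlt, List.drop_take]
        have h2 : L - w - (L - w - (i+1)*w) = (i+1)*w := by omega
        have h3 : L - w - (i+1)*w = L - (i+2)*w := by omega
        rw [h2, h3]
      have h4 : min w ((i+1)*w) = w := min_eq_left (Nat.le_mul_of_pos_left w (by omega))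
      have h5 : (i+2)*w = (i+1+1)*w := by ring
      rw [e1, List.take_take, h4, h5]


-- ===== VERDICT (by name: the statement is the Claim_ definition above) =====
theorem buwei_spec : Claim_equal_buwei := by
  intro es p _ hp
  unfold Spec_buwei buwei buwei_alt
  simp only []
  set cs := es.toList with hcs
  set n : Int := (cs.length : Int) with hn
  set c : Int := -(PySem.Int.floordiv (-n) p) with hc
  set pad : Int := c * p - n with hpad
  have hn0 : 0 ≤ n := by positivity
  by_cases hle : pad ≤ 0
  · -- no padding: the loop runs zero times, both sides return the input unchanged
    have hfuel : (c * p - n).toNat = 0 := by omega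
    rw [hfuel, if_pos hle]
    simp [buweiLoop, hcs]
  · -- padding needed: p > 0 (for p < 0 the target never exceeds n)
    have hpos : 0 < pad := by omega
    have hppos : 0 < p := by
      rcases lt_trichotomy p 0 with hneg | hz | hpp
      · exfalso
        have hfm := PySem.Int.floordiv_mul_add_mod (-n) p
        have hb := PySem.Int.mod_neg_bounds (a := -n) hneg
        have : c * p = n + PySem.Int.mod (-n) p := by
          rw [hc]; ring_nf; linarith [hfm]
        omega
      · exact absurd hz hp
      · exact hpp
    have hiff := (PySem.Int.neg_floordiv_neg_eq_iff_of_pos (a := n) (b := p) (q := c) hppos).mp hc.symm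
    have hc1 : (c - 1) * p < n := hiff.1
    have hc2 : n ≤ c * p := hiff.2
    have hnpos : 0 < n := by
      by_contra h
      have hn' : n = 0 := by omega
      have hcle : c ≤ 0 := by nlinarith
      have hcge : 0 ≤ c := by nlinarith
      have hc0 : c = 0 := by omega
      have : c * p = 0 := by rw [hc0]; ring
      omega
    have hcpos : 1 ≤ c := by
      by_contra h
      have : c * p ≤ 0 := by nlinarith
      omega
    have hkey : pad * (c - 1) < n := by nlinarith
    -- Nat versions of all quantities
    set N : Nat := cs.length with hN
    have hwc : ((c - 1).toNat : Int) = c - 1 := Int.toNat_of_nonneg (by omega)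
    set w : Nat := (c - 1).toNat with hwdef
    set padN : Nat := pad.toNat with hpadN
    have hpadc : (padN : Int) = pad := Int.toNat_of_nonneg (by omega)
    have hNk : padN * w < N := by
      have : ((padN * w : Nat) : Int) < (N : Int) := by push_cast [hpadc, hwc]; exact hkey
      exact_mod_cast this
    have hloop := buweiLoop_spec c (c * p) w rfl hcpos padN cs [] n (by omega) (le_of_lt hNk)
    rw [hloop, if_neg hle]
    simp only []
    set keep : Int := n - pad * (c - 1) with hkeep
    have hpw : ((padN * w : Nat) : Int) = pad * (c - 1) := by push_cast [hpadc, hwc]; ring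
    have hkeepN : keep.toNat = N - padN * w := by omega
    rw [PySem.List.slice_to, hkeepN]
    -- A's accumulated chunks, reversed
    rw [List.nil_append, reverse_map_range, PySem.List.foldl_append_eq_flatten, List.nil_append]
    -- B's range comprehension
    rw [PySem.List.pyRange_one, Int.sub_zero, ← hpadc, Int.toNat_natCast, List.map_map]
    congr 1
    congr 1
    congr 1
    apply List.map_congr_left
    intro j hj
    have hjk : j < padN := List.mem_range.mp hj
    simp only [Function.comp]
    have h1 : j * w ≤ padN * w := Nat.mul_le_mul_right w (by omega)
    have hstart : keep + (0 + (j : Int)) * (c - 1) = ((N - padN * w + j * w : Nat) : Int) := by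
      have hx : ((N - padN * w + j * w : Nat) : Int) = (↑N - ↑(padN * w)) + ↑(j * w) := by
        rw [Nat.cast_add, Nat.cast_sub (le_of_lt hNk)]
      have hjw : ((j * w : Nat) : Int) = (0 + (j : Int)) * (c - 1) := by push_cast [hwc]; ring
      rw [hx, hpw, hjw, hkeep, hn]
    have hend : keep + (0 + (j : Int) + 1) * (c - 1)
        = ((N - padN * w + j * w : Nat) : Int) + ((w : Nat) : Int) := by
      have hx : keep + (0 + (j : Int) + 1) * (c - 1) = (keep + (0 + (j : Int)) * (c - 1)) + (c - 1) := by
        ring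
      rw [hx, hstart, hwc]
    rw [hstart, hend, PySem.List.slice_natCast_add]
    have hidx : cs.length - (padN - 1 - j + 1) * w = N - padN * w + j * w := by
      have h2 : padN - 1 - j + 1 = padN - j := by omega
      rw [h2, Nat.sub_mul]
      omega
    rw [hidx]
    omega
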